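-- pv_equiv track=rewrite | github.com/CuzWeAre/CUMT_Program-Test | 2025/Python/5.py | iswave
-- ===== SOURCE A (Python) =====
-- def iswave(x):
--     s = str(x)
--     if len(s) < 3:
--         return False
--     l,r = s[0],s[1]
--     for i in range(len(s)):
--         c = l if i % 2 == 0 else r
--         if c != s[i]:
--             return False
--     return True
-- ===== SOURCE B (Python) =====
-- def iswave(x):
--     s = str(x)
--     if len(s) < 3:
--         return False
--     return all(c == s[0] for c in s[::2]) and all(c == s[1] for c in s[1::2])
-- ===== Notes on version B (the rewrite author's own statement) =====
-- stated objective: simpler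
-- what changed: replaces the single indexed loop with a modular parity conditional by two stride-2 slice passes, each checked for constancy against its first character
import Mathlib
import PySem

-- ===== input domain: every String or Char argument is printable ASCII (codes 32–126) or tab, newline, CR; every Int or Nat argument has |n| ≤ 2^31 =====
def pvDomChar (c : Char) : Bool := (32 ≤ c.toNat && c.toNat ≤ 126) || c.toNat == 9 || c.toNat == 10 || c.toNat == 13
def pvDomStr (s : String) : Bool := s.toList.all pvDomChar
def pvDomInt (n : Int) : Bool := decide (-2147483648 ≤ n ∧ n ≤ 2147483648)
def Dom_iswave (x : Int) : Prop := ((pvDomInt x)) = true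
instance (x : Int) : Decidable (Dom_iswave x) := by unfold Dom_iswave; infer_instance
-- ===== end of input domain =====

-- B replaces A's single indexed loop (parity conditional inside) by two stride-2
-- slice passes checked for constancy: simpler decomposition, same O(n) cost.

-- ===== PORT A =====
-- the for-loop with early return, i carrying the Python loop index
def iswaveLoop (l r : Char) : List Char → Nat → Bool
  | [], _ => true
  | c :: cs, i =>
    let e := if i % 2 == 0 then l else r
    if e != c then false else iswaveLoop l r cs (i + 1)

def iswave (x : Int) : Bool :=
  let s := (PySem.Int.toStr x).toList
  if s.length < 3 then false
  else
    match s with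
    | l :: r :: _ => iswaveLoop l r s 0
    | _ => false      -- unreachable: length ≥ 3

-- ===== PORT B =====
-- s[::2] / s[1::2]: every second element (stride-2 slice, ported by hand; exact for step 2 from 0)
def stride2 {α : Type} : List α → List α
  | [] => []
  | [a] => [a]
  | a :: _ :: rest => a :: stride2 rest

def iswave_alt (x : Int) : Bool :=
  let s := (PySem.Int.toStr x).toList
  if s.length < 3 then false
  else
    match PySem.List.pyGet? s 0, PySem.List.pyGet? s 1 with
    | some l, some r => (stride2 s).all (· == l) && (stride2 s.tail).all (· == r)
    | _, _ => false      -- unreachable: length ≥ 3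

-- ===== PRECONDITION & SPEC =====
def Spec_iswave (x : Int) (out : Bool) : Prop := out = iswave_alt x
instance (x : Int) (out : Bool) : Decidable (Spec_iswave x out) := by unfold Spec_iswave; infer_instance

-- ===== CLAIM (what is proved, stated in full; the proofs are below) =====
def Claim_equal_iswave : Prop := ∀ (x : Int), Dom_iswave x → Spec_iswave x (iswave x)

-- ===== LEMMAS AND PROOFS =====
theorem stride2_cons {α : Type} (c : α) (cs : List α) :
    stride2 (c :: cs) = c :: stride2 cs.tail := by
  cases cs <;> simp [stride2]

theorem iswaveLoop_eq (s : List Char) : ∀ (i : Nat) (l r : Char),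
    iswaveLoop l r s i =
      ((stride2 s).all (· == (if i % 2 == 0 then l else r)) &&
       (stride2 s.tail).all (· == (if i % 2 == 0 then r else l))) := by
  induction s with
  | nil => intro i l r; simp [iswaveLoop, stride2]
  | cons c cs ih =>
    intro i l r
    rcases Nat.mod_two_eq_zero_or_one i with h | h
    · have h' : (i + 1) % 2 = 1 := by omega
      simp only [iswaveLoop, ih (i + 1), stride2_cons, List.tail_cons, h, h',
        List.all_cons]
      by_cases hc : c = l <;> by_cases hr : c = r <;>
        simp [hc, hr, bne, BEq.comm, Bool.beq_eq_decide_eq, Bool.and_comm, Bool.and_left_comm, Bool.and_assoc]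
    · have h' : (i + 1) % 2 = 0 := by omega
      simp only [iswaveLoop, ih (i + 1), stride2_cons, List.tail_cons, h, h',
        List.all_cons]
      by_cases hc : c = l <;> by_cases hr : c = r <;>
        simp [hc, hr, bne, BEq.comm, Bool.beq_eq_decide_eq, Bool.and_comm, Bool.and_left_comm, Bool.and_assoc]

-- ===== VERDICT (by name: the statement is the Claim_ definition above) =====
theorem iswave_spec : Claim_equal_iswave := by
  intro x _
  unfold Spec_iswave iswave iswave_alt
  set s := (PySem.Int.toStr x).toList with hs
  by_cases hlen : s.length < 3
  · simp [hlen]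
  · match s with
    | [] => simp
    | [a] => simp
    | l :: r :: rest =>
      simp only [if_neg hlen]
      rw [iswaveLoop_eq]
      simp
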